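-- pv_equiv track=rewrite | github.com/coblan/helpers | ex.py | findone
-- ===== SOURCE A (Python) =====
-- def findone(collection,dc):
--     for doc in collection:
--         find=True
--         for k,v in dc.items():
--             if doc.get(k)!=v:
--                 find=False
--         if find:
--             return doc
-- ===== SOURCE B (Python) =====
-- def findone(collection, dc):
--     candidates = list(collection)
--     for k, v in dc.items():
--         candidates = [doc for doc in candidates if doc.get(k) == v]
--     return next(iter(candidates), None)
-- ===== Notes on version B (the rewrite author's own statement) =====
-- stated objective: faster
-- what changed: Instead of testing every filter against each doc in a nested loop (A never short-circuits its inner loop), B applies each (k,v) filter as one narrowing comprehension pass over a shrinking candidate list and returns the first survivor.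
import Mathlib
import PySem

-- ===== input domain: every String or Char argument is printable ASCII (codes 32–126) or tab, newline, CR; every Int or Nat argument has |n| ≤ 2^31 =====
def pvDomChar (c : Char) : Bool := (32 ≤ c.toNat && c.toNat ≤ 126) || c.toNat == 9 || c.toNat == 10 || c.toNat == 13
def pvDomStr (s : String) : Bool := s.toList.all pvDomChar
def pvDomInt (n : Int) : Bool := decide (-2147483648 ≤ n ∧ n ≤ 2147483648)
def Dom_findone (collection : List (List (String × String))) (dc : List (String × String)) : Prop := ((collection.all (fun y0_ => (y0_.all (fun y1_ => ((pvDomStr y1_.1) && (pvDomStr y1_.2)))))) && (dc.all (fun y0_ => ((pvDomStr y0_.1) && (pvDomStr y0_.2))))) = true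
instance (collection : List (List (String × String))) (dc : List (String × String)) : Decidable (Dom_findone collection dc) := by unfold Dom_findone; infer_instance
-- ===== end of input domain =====

-- B replaces A's per-doc check-all-filters nested loop by one narrowing filter pass per
-- (k,v) in dc, then takes the first surviving candidate (alternative decomposition).

-- ===== PORT A =====
-- inner 'for k,v in dc.items()' loop: the find flag folded over dc
def findone_flag (doc : List (String × String)) (dc : List (String × String)) : Bool :=
  dc.foldl (fun find kv =>
    if (PySem.Dict.mk doc).get? kv.1 ≠ some kv.2 then false else find) true

def findone (collection : List (List (String × String))) (dc : List (String × String)) : Option (List (String × String)) :=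
  match collection with
  | [] => none
  | doc :: rest =>
    if findone_flag doc dc then some doc else findone rest dc

-- ===== PORT B =====
def findone_alt (collection : List (List (String × String))) (dc : List (String × String)) : Option (List (String × String)) :=
  (dc.foldl (fun cands kv =>
    cands.filter (fun doc => (PySem.Dict.mk doc).get? kv.1 == some kv.2)) collection).head?

-- ===== PRECONDITION & SPEC =====
def Spec_findone (collection : List (List (String × String))) (dc : List (String × String)) (out : Option (List (String × String))) : Prop := out = findone_alt collection dc
instance (collection : List (List (String × String))) (dc : List (String × String)) (out : Option (List (String × String))) : Decidable (Spec_findone collection dc out) := by unfold Spec_findone; infer_instance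

-- ===== CLAIM (what is proved, stated in full; the proofs are below) =====
def Claim_equal_findone : Prop := ∀ (collection : List (List (String × String))) (dc : List (String × String)), Dom_findone collection dc → Spec_findone collection dc (findone collection dc)

-- ===== LEMMAS AND PROOFS =====

-- the flag computed by A's inner loop is the conjunction of all filter checks
theorem findone_flag_eq (doc : List (String × String)) (dc : List (String × String)) :
    findone_flag doc dc = dc.all (fun kv => (PySem.Dict.mk doc).get? kv.1 == some kv.2) := by
  have h : ∀ (l : List (String × String)) (b : Bool),
      l.foldl (fun find kv =>
        if (PySem.Dict.mk doc).get? kv.1 ≠ some kv.2 then false else find) b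
        = (b && l.all (fun kv => (PySem.Dict.mk doc).get? kv.1 == some kv.2)) := by
    intro l
    induction l with
    | nil => simp
    | cons kv tl ih =>
      intro b
      simp only [List.foldl_cons, List.all_cons, ih]
      by_cases hkv : (PySem.Dict.mk doc).get? kv.1 = some kv.2 <;> simp [hkv]
  simpa [findone_flag] using h dc true

-- B's fold of narrowing filters is one filter by the conjunction of all checks
theorem foldl_filter_eq (dc : List (String × String)) (l : List (List (String × String))) :
    dc.foldl (fun cands kv =>
      cands.filter (fun doc => (PySem.Dict.mk doc).get? kv.1 == some kv.2)) l
      = l.filter (fun doc => dc.all (fun kv => (PySem.Dict.mk doc).get? kv.1 == some kv.2)) := by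
  induction dc generalizing l with
  | nil => simp
  | cons kv tl ih =>
    simp only [List.foldl_cons, ih, List.filter_filter, List.all_cons]
    congr 1
    funext a
    exact Bool.and_comm _ _

-- head of a filtered list is the first element satisfying the predicate
theorem head?_filter_eq_find? {α : Type} (p : α → Bool) (l : List α) :
    (l.filter p).head? = l.find? p := by
  induction l with
  | nil => rfl
  | cons x tl ih =>
    by_cases hx : p x <;> simp [hx, ih]

-- ===== VERDICT (by name: the statement is the Claim_ definition above) =====
theorem findone_spec : Claim_equal_findone := by
  intro collection dc hdom
  clear hdom
  unfold Spec_findone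
  rw [findone_alt, foldl_filter_eq, head?_filter_eq_find?]
  induction collection with
  | nil => rfl
  | cons doc rest ih =>
    rw [findone, List.find?_cons, findone_flag_eq]
    by_cases h : dc.all (fun kv => (PySem.Dict.mk doc).get? kv.1 == some kv.2) <;> simp [h, ih]
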